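-- pv_equiv track=rewrite | github.com/sarelg/advent-of-code-2022 | day7secondtry.py | find_dirs
-- ===== SOURCE A (Python) =====
-- def check_name(name, dirs):
--     if name in dirs:
--         name = name + '_'
--         name = check_name(name, dirs)
--     return name
--
-- def find_dirs(data):
--     dirs = ['/']
--     for line in data:
--         if line[0:3] == 'dir':
--             if line[4:] in dirs:
--                 dirs.append(check_name(line[4:], dirs))
--             else:
--                 dirs.append(line[4:])
--     return dirs
-- ===== SOURCE B (Python) =====
-- def find_dirs(data):
--     # stage 1: extract candidate names of all 'dir' lines
--     names = [line[4:] for line in data if line[0:3] == 'dir']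
--     # stage 2: deduplicate with underscore suffixes using a hash set
--     out = ['/']
--     seen = {'/'}
--     for name in names:
--         while name in seen:
--             name += '_'
--         out.append(name)
--         seen.add(name)
--     return out
-- ===== Notes on version B (the rewrite author's own statement) =====
-- stated objective: alternative
-- what changed: The recursive check_name helper is gone: B runs in two stages, first extracting all 'dir' candidate names with a comprehension, then deduplicating them in a separate pass with an inline underscore while-loop over a hash set instead of scanning the dirs list.
import Mathlib
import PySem

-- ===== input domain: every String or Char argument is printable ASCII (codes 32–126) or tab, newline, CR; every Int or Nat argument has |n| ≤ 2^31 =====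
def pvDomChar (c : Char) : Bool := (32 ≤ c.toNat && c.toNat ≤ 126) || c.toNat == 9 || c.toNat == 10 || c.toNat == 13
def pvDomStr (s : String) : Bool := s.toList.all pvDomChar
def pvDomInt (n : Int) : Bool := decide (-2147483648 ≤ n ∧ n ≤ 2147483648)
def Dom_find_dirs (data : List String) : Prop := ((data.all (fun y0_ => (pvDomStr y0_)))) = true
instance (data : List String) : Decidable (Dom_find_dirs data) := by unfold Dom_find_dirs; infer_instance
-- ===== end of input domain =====

-- B is a two-stage rewrite: extract all 'dir' candidate names first, then deduplicate them in a
-- separate pass with an inline underscore loop over a hash set (objective: alternative).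

-- termination helper for the two underscore loops (cited in their decreasing_by)
theorem pvCountP_lt {l : List String} {p q : String → Bool}
    (himp : ∀ x, q x = true → p x = true) {a : String}
    (ha : a ∈ l) (hpa : p a = true) (hqa : q a = false) :
    l.countP q < l.countP p := by
  induction l with
  | nil => cases ha
  | cons b t ih =>
    rcases List.mem_cons.mp ha with rfl | hb
    · simp only [List.countP_cons, hpa, hqa]
      simpa using Nat.lt_succ_of_le (List.countP_mono_left (fun a _ => himp a))
    · simp only [List.countP_cons]
      by_cases hq : q b = true
      · simp [hq, himp b hq]; exact ih hb
      · simp only [Bool.not_eq_true] at hq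
        simp only [hq]
        by_cases hp : p b = true
        · simp [hp]; exact Nat.le_of_lt (ih hb)
        · simp only [Bool.not_eq_true] at hp; simp [hp]; exact ih hb

theorem pvLen_append_underscore (s : String) : (s ++ "_").length = s.length + 1 := by
  simp [String.length_append]
  decide

-- ===== PORT A =====
-- check_name(name, dirs): append '_' while the name is taken (recursive, as in A)
def check_name (name : String) (dirs : List String) : String :=
  if _h : name ∈ dirs then check_name (name ++ "_") dirs else name
termination_by dirs.countP (fun d => decide (name.length ≤ d.length))
decreasing_by
  exact pvCountP_lt
    (fun x hx => by
      rw [pvLen_append_underscore] at hx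
      simp only [decide_eq_true_eq] at hx ⊢; omega)
    _h (by simp) (by simp)

def find_dirs (data : List String) : List String :=
  data.foldl (fun dirs line =>
    if PySem.Str.slice line (some 0) (some 3) = "dir" then
      if PySem.Str.slice line (some 4) none ∈ dirs then
        dirs ++ [check_name (PySem.Str.slice line (some 4) none) dirs]
      else
        dirs ++ [PySem.Str.slice line (some 4) none]
    else dirs) ["/"]

-- ===== PORT B =====
-- stage 1 of Source B: the comprehension [line[4:] for line in data if line[0:3] == 'dir']
def pvNames (data : List String) : List String :=
  data.filterMap (fun line =>
    if PySem.Str.slice line (some 0) (some 3) = "dir" then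
      some (PySem.Str.slice line (some 4) none)
    else none)

-- the inline `while name in seen: name += '_'` loop of Source B
def pvBump (name : String) (seen : PySem.Set String) : String :=
  if _h : PySem.Set.contains seen name then pvBump (name ++ "_") seen else name
termination_by seen.countP (fun d => decide (name.length ≤ d.length))
decreasing_by
  exact pvCountP_lt
    (fun x hx => by
      rw [pvLen_append_underscore] at hx
      simp only [decide_eq_true_eq] at hx ⊢; omega)
    (by simpa [PySem.Set.contains] using _h) (by simp) (by simp)

-- stage 2 of Source B: the dedup pass over the extracted names, carrying (out, seen)
def pvDedup (names : List String) (out : List String) (seen : PySem.Set String) : List String :=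
  match names with
  | [] => out
  | name :: rest =>
    let c := pvBump name seen
    pvDedup rest (out ++ [c]) (PySem.Set.add seen c)

def find_dirs_alt (data : List String) : List String :=
  pvDedup (pvNames data) ["/"] (PySem.Set.ofList ["/"])

-- ===== PRECONDITION & SPEC =====
def Spec_find_dirs (data : List String) (out : List String) : Prop := out = find_dirs_alt data
instance (data : List String) (out : List String) : Decidable (Spec_find_dirs data out) := by unfold Spec_find_dirs; infer_instance

-- ===== CLAIM (what is proved, stated in full; the proofs are below) =====
def Claim_equal_find_dirs : Prop := ∀ (data : List String), Dom_find_dirs data → Spec_find_dirs data (find_dirs data)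

-- ===== LEMMAS AND PROOFS =====

theorem pvBump_eq_check_name (cand : String) (dirs seen : List String)
    (hm : ∀ s, s ∈ seen ↔ s ∈ dirs) : pvBump cand seen = check_name cand dirs := by
  fun_induction check_name cand dirs with
  | case1 name h ih =>
    have hs : name ∈ seen := (hm name).mpr h
    rw [pvBump]
    simp [PySem.Set.contains, hs, ih]
  | case2 name h =>
    have hs : name ∉ seen := fun c => h ((hm name).mp c)
    rw [pvBump]
    simp [PySem.Set.contains, hs]

theorem pvCheck_name_not_mem (cand : String) (dirs : List String) (h : cand ∉ dirs) :
    check_name cand dirs = cand := by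
  rw [check_name]; simp [h]

theorem pvFold_eq (data : List String) (dirs seen : List String)
    (hm : ∀ s, s ∈ seen ↔ s ∈ dirs) :
    data.foldl (fun dirs line =>
      if PySem.Str.slice line (some 0) (some 3) = "dir" then
        if PySem.Str.slice line (some 4) none ∈ dirs then
          dirs ++ [check_name (PySem.Str.slice line (some 4) none) dirs]
        else
          dirs ++ [PySem.Str.slice line (some 4) none]
      else dirs) dirs
    = pvDedup (pvNames data) dirs seen := by
  induction data generalizing dirs seen with
  | nil => rfl
  | cons line rest ih =>
    simp only [List.foldl_cons]
    by_cases hd : PySem.Str.slice line (some 0) (some 3) = "dir"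
    · simp only [hd, if_pos]
      set cand := PySem.Str.slice line (some 4) none with hc
      have hn : pvNames (line :: rest) = cand :: pvNames rest := by
        simp [pvNames, hd, ← hc]
      have hb : pvBump cand seen = check_name cand dirs := pvBump_eq_check_name cand dirs seen hm
      have hA : (if cand ∈ dirs then dirs ++ [check_name cand dirs] else dirs ++ [cand])
          = dirs ++ [check_name cand dirs] := by
        by_cases hmem : cand ∈ dirs
        · simp [hmem]
        · simp [hmem, pvCheck_name_not_mem cand dirs hmem]
      rw [hA, hn]
      show _ = pvDedup (cand :: pvNames rest) dirs seen
      rw [pvDedup]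
      simp only [hb]
      exact ih _ _ (fun s => by
        rw [PySem.Set.mem_add, List.mem_append, List.mem_singleton, hm])
    · have hn : pvNames (line :: rest) = pvNames rest := by simp [pvNames, hd]
      simp only [hd, ite_false, hn]
      exact ih dirs seen hm

-- ===== VERDICT (by name: the statement is the Claim_ definition above) =====
theorem find_dirs_spec : Claim_equal_find_dirs := by
  intro data _
  unfold Spec_find_dirs find_dirs find_dirs_alt
  exact pvFold_eq data ["/"] (PySem.Set.ofList ["/"])
    (fun s => by rw [PySem.Set.mem_ofList])
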